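-- pv_equiv track=rewrite | github.com/hujingguang/v-ops | vops/deploymanage/views.py | resolve_dependence_str
-- ===== SOURCE A (Python) =====
-- def resolve_dependence_str(dependence_str, app_name):
--     """resolve_dependence_str. 处理依赖字符串,只支持处理两层依赖关系
--
--     Args:
--         dependence_str: 依赖关系及分支数据
--         app_name: 主服务名
--
--     Returns:
--         first:  第一层依赖及其分支 {'project':'branch_name'}
--         second: 第二层依赖及其分支列表 {'project':['branch_name']}
--     """
--     de_list = dependence_str.split(',')
--     first = list()
--     second = list()
--     for de in de_list:
--         if de.startswith(app_name+'__'):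
--             first.append(de)
--         else:
--             second.append(de)
--     second_project_branches = dict()
--     first_project_branches = dict()
--     if second:
--         for s in second:
--             project_branch = s.split('__')
--             p_b = project_branch[-1].split(':')
--             if p_b[0] not in second_project_branches:
--                 second_project_branches[p_b[0]] = [p_b[1]]
--             else:
--                 if p_b[1] not in second_project_branches[p_b[0]]:
--                     second_project_branches[p_b[0]].append(p_b[1])
--     if first:
--         for f in first:
--             project_branch = f.split('__')
--             p_b = project_branch[-1].split(':')
--             first_project_branches[p_b[0]] = p_b[1]
--     return first_project_branches, second_project_branches
-- ===== SOURCE B (Python) =====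
-- def resolve_dependence_str(dependence_str, app_name):
--     """Grouping formulation: parse every entry once into (is_first, [project, branch]),
--     build the first-level map as a dict comprehension (last value wins), and build the
--     second-level map by grouping: for each distinct project (first-seen order,
--     dict.fromkeys) collect its branches deduplicated in order."""
--     tokens = [(de.startswith(app_name + '__'), de.split('__')[-1].split(':'))
--               for de in dependence_str.split(',')]
--     first = {pb[0]: pb[1] for top, pb in tokens if top}
--     deps = [(pb[0], pb[1]) for top, pb in tokens if not top]
--     second = {proj: list(dict.fromkeys(b for q, b in deps if q == proj))
--               for proj in dict.fromkeys(q for q, _ in deps)}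
--     return first, second
-- ===== Notes on version B (the rewrite author's own statement) =====
-- stated objective: alternative
-- what changed: Instead of partitioning into lists and incrementally mutating two dicts with membership/append logic, B parses every entry once into tagged tokens and builds both maps declaratively: the first map as a dict comprehension (last value wins), and the second map by grouping — for each distinct project in first-seen order (dict.fromkeys) it collects that project's branches deduplicated in order.
import Mathlib
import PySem

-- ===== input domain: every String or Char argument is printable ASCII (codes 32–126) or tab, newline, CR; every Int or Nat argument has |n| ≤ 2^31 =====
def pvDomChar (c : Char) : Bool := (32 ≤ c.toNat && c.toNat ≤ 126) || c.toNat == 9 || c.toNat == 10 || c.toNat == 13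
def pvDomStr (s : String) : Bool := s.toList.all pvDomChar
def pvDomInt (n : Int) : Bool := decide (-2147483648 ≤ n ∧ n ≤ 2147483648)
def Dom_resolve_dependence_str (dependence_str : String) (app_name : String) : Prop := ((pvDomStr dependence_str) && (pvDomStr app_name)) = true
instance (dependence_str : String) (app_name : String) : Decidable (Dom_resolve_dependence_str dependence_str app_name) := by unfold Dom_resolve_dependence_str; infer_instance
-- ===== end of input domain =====

-- B replaces A's partition-then-mutate construction by a declarative grouping: one parse
-- of each entry, a dict comprehension for the first map, and a per-project grouping
-- (distinct projects in first-seen order, branches deduplicated in order) for the second.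

-- shared helper: the token parse  de.split('__')[-1].split(':')  appearing verbatim in both Pythons
def pvPB (de : String) : List String :=
  (PySem.Str.split? (PySem.List.pyGetD ((PySem.Str.split? de "__").getD []) (-1) "") ":").getD []

-- ===== PORT A =====
def resolve_dependence_str (dependence_str : String) (app_name : String) :
    (List (String × String)) × (List (String × List String)) :=
  let de_list := (PySem.Str.split? dependence_str ",").getD []
  -- for de in de_list: append to first / second
  let fs := de_list.foldl
    (fun (acc : List String × List String) de =>
      if PySem.Str.startswith de (app_name ++ "__") then (acc.1 ++ [de], acc.2)
      else (acc.1, acc.2 ++ [de])) ([], [])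
  -- if second: for s in second: …
  let second_project_branches : PySem.Dict String (List String) :=
    if fs.2 = [] then PySem.Dict.empty
    else fs.2.foldl
      (fun d s =>
        let p_b := pvPB s
        let k := PySem.List.pyGetD p_b 0 ""
        let b := PySem.List.pyGetD p_b 1 ""
        if d.contains k = false then d.insert k [b]
        else if (d.getD k []).contains b then d
        else d.modify k [] (fun l => l ++ [b])) PySem.Dict.empty
  -- if first: for f in first: …
  let first_project_branches : PySem.Dict String String :=
    if fs.1 = [] then PySem.Dict.empty
    else fs.1.foldl
      (fun d f =>
        let p_b := pvPB f
        d.insert (PySem.List.pyGetD p_b 0 "") (PySem.List.pyGetD p_b 1 "")) PySem.Dict.empty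
  (first_project_branches.items, second_project_branches.items)

-- ===== PORT B =====
def resolve_dependence_str_alt (dependence_str : String) (app_name : String) :
    (List (String × String)) × (List (String × List String)) :=
  -- tokens = [(de.startswith(app_name+'__'), de.split('__')[-1].split(':')) for de in …]
  let tokens := ((PySem.Str.split? dependence_str ",").getD []).map
    (fun de => (PySem.Str.startswith de (app_name ++ "__"), pvPB de))
  -- first = {pb[0]: pb[1] for top, pb in tokens if top}   (dict comprehension)
  let first := (tokens.filter (fun t => t.1)).foldl
    (fun (d : PySem.Dict String String) t =>
      d.insert (PySem.List.pyGetD t.2 0 "") (PySem.List.pyGetD t.2 1 "")) PySem.Dict.empty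
  -- deps = [(pb[0], pb[1]) for top, pb in tokens if not top]
  let deps := (tokens.filter (fun t => !t.1)).map
    (fun t => (PySem.List.pyGetD t.2 0 "", PySem.List.pyGetD t.2 1 ""))
  -- second = {proj: list(dict.fromkeys(b for q,b in deps if q==proj)) for proj in dict.fromkeys(q for q,_ in deps)}
  let second := (PySem.List.dedup (deps.map (fun qb => qb.1))).foldl
    (fun (d : PySem.Dict String (List String)) proj =>
      d.insert proj (PySem.List.dedup ((deps.filter (fun qb => qb.1 == proj)).map (fun qb => qb.2))))
    PySem.Dict.empty
  (first.items, second.items)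

-- ===== PRECONDITION & SPEC =====
-- Pre_ excludes exactly the inputs on which Python A raises IndexError: a comma-separated
-- entry whose last '__'-segment contains no ':' (p_b[1] does not exist).
def Pre_resolve_dependence_str (dependence_str : String) (app_name : String) : Prop :=
  ∀ de ∈ (PySem.Str.split? dependence_str ",").getD [], 2 ≤ (pvPB de).length
instance (dependence_str : String) (app_name : String) : Decidable (Pre_resolve_dependence_str dependence_str app_name) := by unfold Pre_resolve_dependence_str; infer_instance

def pvWitness_resolve_dependence_str : String × String := ("app__app:master,libA__util:dev,libA__util:dev2,other:x", "app")

def Spec_resolve_dependence_str (dependence_str : String) (app_name : String) (out : (List (String × String)) × (List (String × List String))) : Prop := out = resolve_dependence_str_alt dependence_str app_name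
instance (dependence_str : String) (app_name : String) (out : (List (String × String)) × (List (String × List String))) : Decidable (Spec_resolve_dependence_str dependence_str app_name out) := by unfold Spec_resolve_dependence_str; infer_instance

-- ===== CLAIM (what is proved, stated in full; the proofs are below) =====
def Claim_equal_resolve_dependence_str : Prop := ∀ (dependence_str : String) (app_name : String), Dom_resolve_dependence_str dependence_str app_name → Pre_resolve_dependence_str dependence_str app_name → Spec_resolve_dependence_str dependence_str app_name (resolve_dependence_str dependence_str app_name)

-- ===== LEMMAS AND PROOFS =====

-- proof-only abbreviations for the parsed components and A's second-loop body
def pvKey (s : String) : String := PySem.List.pyGetD (pvPB s) 0 ""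
def pvBr (s : String) : String := PySem.List.pyGetD (pvPB s) 1 ""

def pvG2 (d : PySem.Dict String (List String)) (s : String) : PySem.Dict String (List String) :=
  if (d.getD (pvKey s) []).contains (pvBr s) then d
  else d.insert (pvKey s) (d.getD (pvKey s) [] ++ [pvBr s])

theorem pv_keys_step (d : PySem.Dict String (List String)) (s : String) :
    (pvG2 d s).keys = PySem.Set.add d.keys (pvKey s) := by
  unfold pvG2
  by_cases hm : pvBr s ∈ d.getD (pvKey s) []
  · have hc : d.contains (pvKey s) = true := by
      by_cases hc : d.contains (pvKey s) = true
      · exact hc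
      · rw [PySem.Dict.getD_of_not_contains (h := by simpa using hc)] at hm
        simp at hm
    simp [hm, PySem.Set.add_of_mem ((PySem.Dict.contains_iff_mem_keys _ _).mp hc)]
  · rw [if_neg (by simpa using hm)]
    by_cases hc : d.contains (pvKey s) = true
    · rw [PySem.Dict.keys_insert_of_contains (h := hc),
        PySem.Set.add_of_mem ((PySem.Dict.contains_iff_mem_keys _ _).mp hc)]
    · rw [PySem.Dict.keys_insert_of_not_contains (h := by simpa using hc),
        PySem.Set.add_of_not_mem]
      intro hmem
      exact hc ((PySem.Dict.contains_iff_mem_keys _ _).mpr hmem)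

theorem pv_keys2 : ∀ (L : List String) (d : PySem.Dict String (List String)),
    (L.foldl pvG2 d).keys = PySem.Set.update d.keys (L.map pvKey) := by
  intro L
  induction L with
  | nil => intro d; simp [PySem.Set.update]
  | cons x xs ih =>
    intro d
    rw [List.foldl_cons, ih, List.map_cons, PySem.Set.update_cons, pv_keys_step]

theorem pv_getD2 : ∀ (L : List String) (d : PySem.Dict String (List String)) (q : String),
    (L.foldl pvG2 d).getD q []
      = ((L.filter (fun s => pvKey s == q)).map pvBr).foldl
          (fun l b => if l.contains b then l else l ++ [b]) (d.getD q []) := by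
  intro L
  induction L with
  | nil => intro d q; simp
  | cons x xs ih =>
    intro d q
    rw [List.foldl_cons, ih]
    by_cases hk : pvKey x = q
    · subst hk
      have hg : (pvG2 d x).getD (pvKey x) []
          = if (d.getD (pvKey x) []).contains (pvBr x) then d.getD (pvKey x) []
            else d.getD (pvKey x) [] ++ [pvBr x] := by
        unfold pvG2
        by_cases hm : pvBr x ∈ d.getD (pvKey x) []
        · simp [hm]
        · rw [if_neg (by simpa using hm), if_neg (by simpa using hm),
            PySem.Dict.getD_insert_self]
      rw [hg]
      simp only [List.filter_cons, beq_self_eq_true, if_true, List.map_cons, List.foldl_cons]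
    · have hg : (pvG2 d x).getD q [] = d.getD q [] := by
        unfold pvG2
        by_cases hm : pvBr x ∈ d.getD (pvKey x) []
        · simp [hm]
        · rw [if_neg (by simpa using hm), PySem.Dict.getD_insert_of_ne (hne := Ne.symm hk)]
      rw [hg]
      have hne : (pvKey x == q) = false := by simpa using hk
      simp only [List.filter_cons, hne, Bool.false_eq_true, if_false]

theorem pv_partition {γ : Type} (p : γ → Bool) :
    ∀ (l : List γ) (f s : List γ),
      l.foldl (fun (acc : List γ × List γ) de =>
        if p de then (acc.1 ++ [de], acc.2) else (acc.1, acc.2 ++ [de])) (f, s)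
      = (f ++ l.filter p, s ++ l.filter (fun de => !p de)) := by
  intro l
  induction l with
  | nil => intro f s; simp
  | cons x xs ih =>
    intro f s
    by_cases hx : p x = true <;> simp [List.foldl_cons, hx, ih]

theorem pv_if_nil {α β β' : Type} [BEq α] (l : List β) (g : PySem.Dict α β' → β → PySem.Dict α β') :
    (if l = [] then PySem.Dict.empty else l.foldl g PySem.Dict.empty) = l.foldl g PySem.Dict.empty := by
  by_cases h : l = [] <;> simp [h]

theorem pv_stepS_eq :
    (fun (d : PySem.Dict String (List String)) s =>
      let p_b := pvPB s
      let k := PySem.List.pyGetD p_b 0 ""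
      let b := PySem.List.pyGetD p_b 1 ""
      if d.contains k = false then d.insert k [b]
      else if (d.getD k []).contains b then d
      else d.modify k [] (fun l => l ++ [b])) = pvG2 := by
  funext d s
  show _ = pvG2 d s
  unfold pvG2 pvKey pvBr
  by_cases hc : d.contains (PySem.List.pyGetD (pvPB s) 0 "") = true
  · simp only [hc, Bool.true_eq_false, if_false, PySem.Dict.modify]
  · have hc' : d.contains (PySem.List.pyGetD (pvPB s) 0 "") = false := by simpa using hc
    simp [PySem.Dict.getD_of_not_contains, hc']

set_option maxHeartbeats 1000000 in
theorem pv_main (p : String → Bool) (de_list : List String) :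
    (let fs := de_list.foldl
        (fun (acc : List String × List String) de =>
          if p de then (acc.1 ++ [de], acc.2) else (acc.1, acc.2 ++ [de])) ([], [])
     let second_project_branches : PySem.Dict String (List String) :=
       if fs.2 = [] then PySem.Dict.empty
       else fs.2.foldl
         (fun d s =>
           let p_b := pvPB s
           let k := PySem.List.pyGetD p_b 0 ""
           let b := PySem.List.pyGetD p_b 1 ""
           if d.contains k = false then d.insert k [b]
           else if (d.getD k []).contains b then d
           else d.modify k [] (fun l => l ++ [b])) PySem.Dict.empty
     let first_project_branches : PySem.Dict String String :=
       if fs.1 = [] then PySem.Dict.empty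
       else fs.1.foldl
         (fun d f =>
           let p_b := pvPB f
           d.insert (PySem.List.pyGetD p_b 0 "") (PySem.List.pyGetD p_b 1 "")) PySem.Dict.empty
     ((first_project_branches.items, second_project_branches.items) :
       (List (String × String)) × (List (String × List String))))
    = (let tokens := de_list.map (fun de => (p de, pvPB de))
       let first := (tokens.filter (fun t => t.1)).foldl
         (fun (d : PySem.Dict String String) t =>
           d.insert (PySem.List.pyGetD t.2 0 "") (PySem.List.pyGetD t.2 1 "")) PySem.Dict.empty
       let deps := (tokens.filter (fun t => !t.1)).map
         (fun t => (PySem.List.pyGetD t.2 0 "", PySem.List.pyGetD t.2 1 ""))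
       let second := (PySem.List.dedup (deps.map (fun qb => qb.1))).foldl
         (fun (d : PySem.Dict String (List String)) proj =>
           d.insert proj (PySem.List.dedup ((deps.filter (fun qb => qb.1 == proj)).map (fun qb => qb.2))))
         PySem.Dict.empty
       (first.items, second.items)) := by
  dsimp only
  rw [pv_partition p de_list [] [], pv_stepS_eq, pv_if_nil, pv_if_nil]
  have hfilT : (de_list.map (fun de => (p de, pvPB de))).filter (fun t => t.1)
      = (de_list.filter p).map (fun de => (p de, pvPB de)) := by
    rw [List.filter_map]; rfl
  have hfilF : (de_list.map (fun de => (p de, pvPB de))).filter (fun t => !t.1)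
      = (de_list.filter (fun de => !p de)).map (fun de => (p de, pvPB de)) := by
    rw [List.filter_map]; rfl
  have hdeps : ((de_list.map (fun de => (p de, pvPB de))).filter (fun t => !t.1)).map
      (fun t => (PySem.List.pyGetD t.2 0 "", PySem.List.pyGetD t.2 1 ""))
      = (de_list.filter (fun de => !p de)).map (fun s => (pvKey s, pvBr s)) := by
    rw [hfilF, List.map_map]
    rfl
  refine Prod.ext ?_ ?_
  · -- first components
    simp only [List.nil_append, hfilT, List.foldl_map]
  · -- second components
    simp only [List.nil_append, hdeps]
    have hkeys : ((de_list.filter (fun de => !p de)).foldl pvG2 PySem.Dict.empty).keys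
        = PySem.Set.ofList ((de_list.filter (fun de => !p de)).map pvKey) := by
      rw [pv_keys2, PySem.Dict.keys_empty, PySem.Set.update_nil_left]
    have hnd : ((de_list.filter (fun de => !p de)).foldl pvG2 PySem.Dict.empty).keys.Nodup := by
      rw [hkeys]; exact PySem.Set.nodup_ofList _
    rw [PySem.Dict.items_eq_map_keys _ hnd ([] : List String), hkeys]
    have hKmap : ((de_list.filter (fun de => !p de)).map (fun s => (pvKey s, pvBr s))).map
        (fun qb => qb.1) = (de_list.filter (fun de => !p de)).map pvKey := by
      rw [List.map_map]
      rfl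
    rw [hKmap]
    rw [PySem.Dict.items_foldl_insert_fresh
      (l := PySem.List.dedup ((de_list.filter (fun de => !p de)).map pvKey))
      (k := fun a => a)
      (v := fun proj => PySem.List.dedup
        ((((de_list.filter (fun de => !p de)).map (fun s => (pvKey s, pvBr s))).filter
          (fun qb => qb.1 == proj)).map (fun qb => qb.2)))
      (d := PySem.Dict.empty)
      (by intro a _; simp) (by simpa using (PySem.List.nodup_dedup ((de_list.filter (fun de => !p de)).map pvKey)))]
    rw [show (PySem.Dict.empty : PySem.Dict String (List String)).items = [] from rfl,
      List.nil_append, PySem.List.dedup_eq_ofList]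
    apply List.map_congr_left
    intro q _
    refine Prod.ext rfl ?_
    rw [pv_getD2, PySem.Dict.getD_empty]
    have hfq : (((de_list.filter (fun de => !p de)).map (fun s => (pvKey s, pvBr s))).filter
        (fun qb => qb.1 == q)).map (fun qb => qb.2)
        = ((de_list.filter (fun de => !p de)).filter (fun s => pvKey s == q)).map pvBr := by
      rw [List.filter_map, List.map_map]
      rfl
    rw [hfq, PySem.List.dedup_eq_ofList, PySem.Set.ofList_eq_foldl]
    rfl

-- ===== VERDICT (by name: the statement is the Claim_ definition above) =====
theorem resolve_dependence_str_spec : Claim_equal_resolve_dependence_str := by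
  intro dependence_str app_name _ _
  show resolve_dependence_str dependence_str app_name = resolve_dependence_str_alt dependence_str app_name
  exact pv_main (fun de => PySem.Str.startswith de (app_name ++ "__"))
    ((PySem.Str.split? dependence_str ",").getD [])
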